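-- pv_equiv track=rewrite | github.com/sebastianNietoMolina/CNYT | Complejos.py | llenarDos
-- ===== SOURCE A (Python) =====
-- def llenarDos(g,r,o,p,div):
--     temp=0
--     k=o
--     vec=0
--     while temp!=r:
--         temp+=1
--         i=0
--         while i!=o:
--             g[k][temp]=p[vec]
--             vec+=1
--             i+=1
--             k+=1
--         k-=div
--     return g
-- ===== SOURCE B (Python) =====
-- def llenarDos(g, r, o, p, div):
--     # single flat pass: each write's position computed in closed form from its flat index
--     n = r * o
--     vec = 0
--     while vec != n:
--         t, i = divmod(vec, o)
--         g[o + t * (o - div) + i][t + 1] = p[vec]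
--         vec += 1
--     return g
-- ===== Notes on version B (the rewrite author's own statement) =====
-- stated objective: simpler
-- what changed: Replaces A's two nested counter-driven while-loops (running k/temp/vec accumulators) with a single flat pass over the flat index vec < r*o that computes each write's row and column in closed form from divmod(vec, o).
import Mathlib
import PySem

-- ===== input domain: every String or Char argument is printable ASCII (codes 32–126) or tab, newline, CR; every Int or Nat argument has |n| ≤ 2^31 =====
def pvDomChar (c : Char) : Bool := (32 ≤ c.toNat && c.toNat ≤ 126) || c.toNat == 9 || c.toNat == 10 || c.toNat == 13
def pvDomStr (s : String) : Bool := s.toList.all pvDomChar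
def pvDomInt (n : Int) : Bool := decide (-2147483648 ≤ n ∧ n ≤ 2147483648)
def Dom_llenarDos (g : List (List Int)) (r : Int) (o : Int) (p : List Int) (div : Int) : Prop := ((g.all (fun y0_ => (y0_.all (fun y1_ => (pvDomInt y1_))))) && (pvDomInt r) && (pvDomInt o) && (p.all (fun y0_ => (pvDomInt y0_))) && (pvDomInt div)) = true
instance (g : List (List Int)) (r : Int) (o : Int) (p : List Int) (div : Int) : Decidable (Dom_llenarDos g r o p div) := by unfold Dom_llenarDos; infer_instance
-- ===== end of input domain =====

-- B replaces A's nested counter-driven while-loops with one flat pass computing each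
-- write's position in closed form (objective: simpler).  Both Pythons mutate g in place
-- identically; the theorems here are about the returned value.

-- ===== PORT A =====
-- inner 'while i!=o' loop: one write g[k][temp]=p[vec] per step, then vec+=1; i+=1; k+=1.
-- Fuel is o.toNat (the loop's trip count when 0 ≤ o, per Pre_; Python diverges for o < 0).
def llenarDosInner (p : List Int) (temp : Int) :
    Nat → List (List Int) → Int → Int → (List (List Int)) × Int × Int
  | 0, g, k, vec => (g, k, vec)
  | Nat.succ fuel, g, k, vec =>
    let g' := PySem.List.pySetD g k
      (PySem.List.pySetD (PySem.List.pyGetD g k []) temp (PySem.List.pyGetD p vec 0))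
    llenarDosInner p temp fuel g' (k + 1) (vec + 1)

-- outer 'while temp!=r' loop: temp+=1, run the inner loop, then k-=div.
def llenarDosOuter (p : List Int) (o d : Int) :
    Nat → List (List Int) → Int → Int → Int → List (List Int)
  | 0, g, _, _, _ => g
  | Nat.succ fuel, g, temp, k, vec =>
    let temp' := temp + 1
    let s := llenarDosInner p temp' o.toNat g k vec
    llenarDosOuter p o d fuel s.1 temp' (s.2.1 - d) s.2.2

def llenarDos (g : List (List Int)) (r : Int) (o : Int) (p : List Int) (div : Int) :
    List (List Int) :=
  llenarDosOuter p o div r.toNat g 0 o 0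

-- ===== PORT B =====
-- one step of B's flat loop body: t, i = divmod(vec, o); g[o+t*(o-div)+i][t+1] = p[vec]
def llenarDosStep (o d : Int) (p : List Int) (g : List (List Int)) (vec : Int) :
    List (List Int) :=
  let t := PySem.Int.floordiv vec o
  let i := PySem.Int.mod vec o
  let row := o + t * (o - d) + i
  PySem.List.pySetD g row
    (PySem.List.pySetD (PySem.List.pyGetD g row []) (t + 1) (PySem.List.pyGetD p vec 0))

-- B's flat 'while vec != n' loop; fuel n.toNat is its trip count when 0 ≤ n (Pre_;
-- for n < 0 the Python loop diverges, no claim there).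
def llenarDosLoop (o d : Int) (p : List Int) (n : Int) :
    Nat → List (List Int) → Int → List (List Int)
  | 0, g, _ => g
  | Nat.succ fuel, g, vec =>
    if vec = n then g
    else llenarDosLoop o d p n fuel (llenarDosStep o d p g vec) (vec + 1)

def llenarDos_alt (g : List (List Int)) (r : Int) (o : Int) (p : List Int) (div : Int) :
    List (List Int) :=
  llenarDosLoop o div p (r * o) (r * o).toNat g 0

-- ===== PRECONDITION & SPEC =====
-- Exactly the inputs where the Python A returns: r ≥ 0 and, if any row is processed,
-- o ≥ 0 (else a while loop never terminates), p long enough, and every accessed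
-- row/column index in Python range (negative wraparound included).
def Pre_llenarDos (g : List (List Int)) (r : Int) (o : Int) (p : List Int) (div : Int) : Prop :=
  0 ≤ r ∧ (0 < r → 0 ≤ o) ∧ r * o ≤ (p.length : Int) ∧
  ∀ t < r.toNat, ∀ i < o.toNat,
    PySem.Raise.InRange g.length (o + (t : Int) * (o - div) + (i : Int)) ∧
    PySem.Raise.InRange
      (PySem.List.pyGetD g (o + (t : Int) * (o - div) + (i : Int)) []).length ((t : Int) + 1)
instance (g : List (List Int)) (r : Int) (o : Int) (p : List Int) (div : Int) :
    Decidable (Pre_llenarDos g r o p div) := by unfold Pre_llenarDos; infer_instance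

def pvWitness_llenarDos : List (List Int) × Int × Int × List Int × Int :=
  ([[0, 0], [0, 0]], 1, 1, [7], 0)

def Spec_llenarDos (g : List (List Int)) (r : Int) (o : Int) (p : List Int) (div : Int)
    (out : List (List Int)) : Prop := out = llenarDos_alt g r o p div
instance (g : List (List Int)) (r : Int) (o : Int) (p : List Int) (div : Int)
    (out : List (List Int)) : Decidable (Spec_llenarDos g r o p div out) := by
  unfold Spec_llenarDos; infer_instance

-- ===== CLAIM =====
def Claim_equal_llenarDos : Prop :=
  ∀ (g : List (List Int)) (r : Int) (o : Int) (p : List Int) (div : Int),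
    Dom_llenarDos g r o p div → Pre_llenarDos g r o p div →
    Spec_llenarDos g r o p div (llenarDos g r o p div)

-- ===== LEMMAS AND PROOFS =====

-- B's counted flat loop is the fold of its step over the flat index range.
theorem loop_eq_foldl (o d : Int) (p : List Int) (n : Int) :
    ∀ (m : Nat) (vec : Int), vec + (m : Int) = n → ∀ (g : List (List Int)),
    llenarDosLoop o d p n m g vec
      = (PySem.List.pyRange vec n 1).foldl (llenarDosStep o d p) g := by
  intro m
  induction m with
  | zero =>
    intro vec h g
    rw [PySem.List.pyRange_one_eq_nil (by omega)]
    simp [llenarDosLoop]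
  | succ m ih =>
    intro vec h g
    have hv : vec < n := by omega
    rw [PySem.List.pyRange_one_cons hv]
    simp only [llenarDosLoop, if_neg (by omega : ¬ vec = n), List.foldl_cons]
    exact ih (vec + 1) (by push_cast at h ⊢; omega) _

-- hence, when the trip count is well defined:
theorem alt_eq_foldl (g : List (List Int)) (r o : Int) (p : List Int) (d : Int)
    (h : 0 ≤ r * o) :
    llenarDos_alt g r o p d
      = (PySem.List.pyRange 0 (r * o) 1).foldl (llenarDosStep o d p) g := by
  unfold llenarDos_alt
  exact loop_eq_foldl o d p (r * o) (r * o).toNat 0 (by omega) g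

-- A's inner loop, started at k = o + t*(o-div) + j and vec = t*o + j, performs exactly
-- the block of B's flat writes for vec ∈ [t*o + j, t*o + j + m).
theorem inner_eq_block (p : List Int) (o d : Int) (ho : 0 < o) (t : Int) :
    ∀ (m : Nat) (j : Int), 0 ≤ j → j + (m : Int) ≤ o → ∀ (g : List (List Int)),
    llenarDosInner p (t + 1) m g (o + t * (o - d) + j) (t * o + j)
      = ((PySem.List.pyRange (t * o + j) (t * o + j + (m : Int)) 1).foldl
          (llenarDosStep o d p) g,
         o + t * (o - d) + j + (m : Int), t * o + j + (m : Int)) := by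
  intro m
  induction m with
  | zero =>
    intro j _ _ g
    rw [show t * o + j + ((0 : Nat) : Int) = t * o + j by push_cast; ring,
        PySem.List.pyRange_one_eq_nil (le_refl _)]
    simp [llenarDosInner]
  | succ m ih =>
    intro j hj0 hjm g
    have hcast : ((m + 1 : Nat) : Int) = (m : Int) + 1 := by push_cast; ring
    have hjo : j < o := by omega
    have ht' : PySem.Int.floordiv (t * o + j) o = t := by
      rw [PySem.Int.floordiv_eq_iff_of_pos ho]
      constructor <;> nlinarith
    have hi' : PySem.Int.mod (t * o + j) o = j := by
      have := PySem.Int.floordiv_mul_add_mod (t * o + j) o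
      rw [ht'] at this; omega
    have hstep : llenarDosStep o d p g (t * o + j)
        = PySem.List.pySetD g (o + t * (o - d) + j)
            (PySem.List.pySetD (PySem.List.pyGetD g (o + t * (o - d) + j) []) (t + 1)
              (PySem.List.pyGetD p (t * o + j) 0)) := by
      simp only [llenarDosStep, ht', hi']
    have hrange : PySem.List.pyRange (t * o + j) (t * o + j + ((m + 1 : Nat) : Int)) 1
        = (t * o + j) :: PySem.List.pyRange (t * o + j + 1) (t * o + j + ((m + 1 : Nat) : Int)) 1 := by
      exact PySem.List.pyRange_one_cons (by omega)
    rw [hrange]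
    simp only [List.foldl_cons, llenarDosInner]
    rw [hstep]
    have := ih (j + 1) (by omega) (by omega)
      (PySem.List.pySetD g (o + t * (o - d) + j)
        (PySem.List.pySetD (PySem.List.pyGetD g (o + t * (o - d) + j) []) (t + 1)
          (PySem.List.pyGetD p (t * o + j) 0)))
    rw [show o + t * (o - d) + j + 1 = o + t * (o - d) + (j + 1) by ring,
        show t * o + j + 1 = t * o + (j + 1) by ring, this]
    have e1 : t * o + (j + 1) + (m : Int) = t * o + j + ((m + 1 : Nat) : Int) := by
      push_cast; ring
    have e2 : o + t * (o - d) + (j + 1) + (m : Int) = o + t * (o - d) + j + ((m + 1 : Nat) : Int) := by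
      push_cast; ring
    rw [e1, e2]

-- A's outer loop from row block t onwards equals B's flat fold over [t*o, (t+n)*o).
theorem outer_eq_fold (p : List Int) (o d : Int) (ho : 0 < o) :
    ∀ (n : Nat) (t : Int), 0 ≤ t → ∀ (g : List (List Int)),
    llenarDosOuter p o d n g t (o + t * (o - d)) (t * o)
      = (PySem.List.pyRange (t * o) ((t + (n : Int)) * o) 1).foldl (llenarDosStep o d p) g := by
  intro n
  induction n with
  | zero =>
    intro t _ g
    rw [PySem.List.pyRange_one_eq_nil (by push_cast; nlinarith)]
    simp [llenarDosOuter]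
  | succ n ih =>
    intro t ht g
    have hinner := inner_eq_block p o d ho t o.toNat 0 (le_refl 0) (by omega) g
    simp only [llenarDosOuter]
    rw [show o + t * (o - d) + 0 = o + t * (o - d) by ring,
        show t * o + 0 = t * o by ring] at hinner
    rw [hinner]
    have hoo : (o.toNat : Int) = o := by omega
    rw [hoo] at *
    have hk : o + t * (o - d) + o - d = o + (t + 1) * (o - d) := by ring
    have hv : t * o + o = (t + 1) * o := by ring
    rw [hk, hv, ih (t + 1) (by omega)]
    rw [← List.foldl_append, ← PySem.List.pyRange_one_append (t * o) ((t + 1) * o)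
      ((t + 1 + (n : Int)) * o) (by nlinarith) (by nlinarith)]
    congr 2
    push_cast; ring

theorem llenarDos_spec : Claim_equal_llenarDos := by
  intro g r o p d _ hpre
  obtain ⟨hr, hro, -, -⟩ := hpre
  unfold Spec_llenarDos llenarDos
  have hn : 0 ≤ r * o := by
    rcases lt_or_eq_of_le hr with h | h
    · exact mul_nonneg (le_of_lt h) (hro h)
    · simp [← h]
  rw [alt_eq_foldl _ _ _ _ _ hn]
  by_cases hr0 : r = 0
  · -- r = 0: A's outer loop never runs, B's range is empty
    subst hr0
    rw [show (0 : Int) * o = 0 by ring, PySem.List.pyRange_one_eq_nil (le_refl _)]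
    simp [llenarDosOuter]
  have ho : 0 ≤ o := hro (by omega)
  rcases lt_or_eq_of_le ho with ho' | ho'
  · have := outer_eq_fold p o d ho' r.toNat 0 (le_refl 0) g
    rw [show o + 0 * (o - d) = o by ring, show (0 : Int) * o = 0 by ring] at this
    rw [this]
    congr 2
    have hr' : (r.toNat : Int) = r := by omega
    rw [hr']; ring
  · -- o = 0: the inner loop is empty; A returns g, and B's range is empty.
    subst ho'
    rw [show r * (0 : Int) = 0 by ring, PySem.List.pyRange_one_eq_nil (le_refl _)]
    simp only [List.foldl_nil]
    suffices h : ∀ (n : Nat) (g' : List (List Int)) (temp k vec : Int),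
        llenarDosOuter p 0 d n g' temp k vec = g' by exact h _ g 0 0 0
    intro n
    induction n with
    | zero => intro g' temp k vec; simp [llenarDosOuter]
    | succ n ih =>
      intro g' temp k vec
      simp only [llenarDosOuter, Int.toNat_zero, llenarDosInner]
      exact ih _ _ _ _

-- ===== VERDICT =====
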